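-- pv_equiv track=rewrite | github.com/Shiyang0530/Hexagonal | Hexagon.py | generate_hex_points
-- ===== SOURCE A (Python) =====
-- def generate_hex_points(num_points=500):
--     points = []
--     radius = 0
--     while len(points) < num_points:
--         points = []
--         for q in range(-radius, radius + 1):
--             r1 = max(-radius, -q - radius)
--             r2 = min(radius, -q + radius)
--             for r in range(r1, r2 + 1):
--                 points.append((q, r))
--         radius += 1
--     return points[:num_points]
-- ===== SOURCE B (Python) =====
-- def generate_hex_points(num_points=500):
--     if num_points <= 0:
--         return []
--     # smallest radius R with 3*R*(R+1)+1 >= num_points (hex number of radius R)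
--     R = 0
--     while 3 * R * (R + 1) + 1 < num_points:
--         R += 1
--     points = [(q, r)
--               for q in range(-R, R + 1)
--               for r in range(-R - min(q, 0), R - max(q, 0) + 1)]
--     return points[:num_points]
-- ===== Notes on version B (the rewrite author's own statement) =====
-- stated objective: faster
-- what changed: Instead of rebuilding the whole grid from scratch for every candidate radius, B finds the minimal radius whose centered-hexagonal point count reaches num_points by a cheap arithmetic loop and builds the point list exactly once.
import Mathlib
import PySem

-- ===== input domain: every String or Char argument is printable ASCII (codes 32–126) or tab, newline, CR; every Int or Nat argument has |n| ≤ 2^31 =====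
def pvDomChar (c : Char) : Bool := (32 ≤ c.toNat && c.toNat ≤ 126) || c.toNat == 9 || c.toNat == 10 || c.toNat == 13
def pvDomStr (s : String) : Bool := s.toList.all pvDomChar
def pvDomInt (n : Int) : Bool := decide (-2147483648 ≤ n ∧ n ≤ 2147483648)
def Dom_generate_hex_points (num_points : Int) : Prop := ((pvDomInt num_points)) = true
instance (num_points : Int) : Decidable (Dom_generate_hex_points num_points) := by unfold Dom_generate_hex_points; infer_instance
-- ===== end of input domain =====

-- B computes the final radius arithmetically and builds the point list once, instead of
-- rebuilding the whole grid for every candidate radius (objective: faster).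

-- ===== PORT A =====
-- inner 'for r in range(r1, r2+1): points.append((q, r))'
def hexInnerA (radius q : Int) (points : List (Int × Int)) : List (Int × Int) :=
  let r1 := max (-radius) (-q - radius)
  let r2 := min radius (-q + radius)
  (PySem.List.pyRange r1 (r2 + 1) 1).foldl (fun pts r => pts ++ [(q, r)]) points

-- body of one while-iteration: 'points = []; for q in range(-radius, radius+1): …'
def hexBuildA (radius : Int) : List (Int × Int) :=
  (PySem.List.pyRange (-radius) (radius + 1) 1).foldl (fun pts q => hexInnerA radius q pts) []

-- A's while loop; the fuel is a totality guard only — num_points.toNat + 1 steps provably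
-- suffice for the loop to exit, so the fuel-0 branch is never the exit on any input
def hexLoopA (num_points : Int) (points : List (Int × Int)) (radius : Int) : Nat → List (Int × Int)
  | 0 => points
  | Nat.succ f =>
      if PySem.List.len points < num_points then
        hexLoopA num_points (hexBuildA radius) (radius + 1) f
      else points

def generate_hex_points (num_points : Int) : List (Int × Int) :=
  PySem.List.slice (hexLoopA num_points [] 0 (num_points.toNat + 1)) none (some num_points)

-- ===== PORT B =====
-- 'while 3*R*(R+1)+1 < num_points: R += 1' (fuel = totality guard, provably sufficient)
def hexRadiusB (num_points : Int) : Int → Nat → Int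
  | R, 0 => R
  | R, Nat.succ f =>
      if 3 * R * (R + 1) + 1 < num_points then hexRadiusB num_points (R + 1) f else R

-- the comprehension '[(q, r) for q in range(-R, R+1) for r in range(-R - min(q,0), R - max(q,0) + 1)]'
def hexBuildB (R : Int) : List (Int × Int) :=
  (PySem.List.pyRange (-R) (R + 1) 1).flatMap (fun q =>
    (PySem.List.pyRange (-R - min q 0) (R - max q 0 + 1) 1).map (fun r => (q, r)))

def generate_hex_points_alt (num_points : Int) : List (Int × Int) :=
  if num_points ≤ 0 then []
  else
    PySem.List.slice (hexBuildB (hexRadiusB num_points 0 (num_points.toNat + 1))) none (some num_points)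

-- ===== PRECONDITION & SPEC =====
def Spec_generate_hex_points (num_points : Int) (out : List (Int × Int)) : Prop := out = generate_hex_points_alt num_points
instance (num_points : Int) (out : List (Int × Int)) : Decidable (Spec_generate_hex_points num_points out) := by unfold Spec_generate_hex_points; infer_instance

-- ===== CLAIM (what is proved, stated in full; the proofs are below) =====
def Claim_equal_generate_hex_points : Prop := ∀ (num_points : Int), Dom_generate_hex_points num_points → Spec_generate_hex_points num_points (generate_hex_points num_points)

-- ===== LEMMAS AND PROOFS =====

-- A's doubly-nested append loop builds exactly B's flatMap list
theorem hexInnerA_eq (R q : Int) (pts : List (Int × Int)) :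
    hexInnerA R q pts
      = pts ++ (PySem.List.pyRange (-R - min q 0) (R - max q 0 + 1) 1).map (fun r => (q, r)) := by
  show (PySem.List.pyRange (max (-R) (-q - R)) (min R (-q + R) + 1) 1).foldl
      (fun pts r => pts ++ [(q, r)]) pts = _
  rw [show max (-R) (-q - R) = -R - min q 0 by omega,
      show min R (-q + R) + 1 = R - max q 0 + 1 by omega,
      PySem.List.foldl_append_singleton_eq_map]

theorem hexBuildA_eq (R : Int) : hexBuildA R = hexBuildB R := by
  unfold hexBuildA hexBuildB
  calc (PySem.List.pyRange (-R) (R + 1) 1).foldl (fun pts q => hexInnerA R q pts) []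
      = (PySem.List.pyRange (-R) (R + 1) 1).foldl (fun pts q =>
          pts ++ (PySem.List.pyRange (-R - min q 0) (R - max q 0 + 1) 1).map (fun r => (q, r))) [] :=
        PySem.List.foldl_congr_mem _ _ _ _ (fun acc x _ => hexInnerA_eq R x acc)
    _ = [] ++ (PySem.List.pyRange (-R) (R + 1) 1).flatMap (fun q =>
          (PySem.List.pyRange (-R - min q 0) (R - max q 0 + 1) 1).map (fun r => (q, r))) :=
        PySem.List.foldl_append_eq_flatMap _ _ _
    _ = _ := List.nil_append _

-- length of B's list as an Int-valued sum over the q-range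
theorem lenB_sum (R : Int) :
    ((hexBuildB R).length : Int)
      = ((PySem.List.pyRange (-R) (R + 1) 1).map (fun q => 2 * R + 1 - max q 0 + min q 0)).sum := by
  unfold hexBuildB
  rw [List.length_flatMap, Nat.cast_list_sum, List.map_map]
  refine congrArg List.sum (List.map_congr_left ?_)
  intro q hq
  rw [PySem.List.mem_pyRange_one] at hq
  simp only [Function.comp, List.length_map, PySem.List.length_pyRange_one]
  omega

-- the hexagonal-number identity: the sum evaluates to 3R(R+1)+1
theorem hexSum_formula (n : Nat) :
    ((PySem.List.pyRange (-(n : Int)) ((n : Int) + 1) 1).map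
        (fun q => 2 * (n : Int) + 1 - max q 0 + min q 0)).sum
      = 3 * (n : Int) * ((n : Int) + 1) + 1 := by
  induction n with
  | zero => decide
  | succ m ih =>
      push_cast
      rw [show ((m : Int) + 1 + 1) = ((m : Int) + 1) + 1 by ring,
          PySem.List.pyRange_one_cons (by omega),
          show (-((m : Int) + 1) + 1) = -(m : Int) by ring,
          PySem.List.pyRange_one_succ_right (by omega)]
      rw [List.map_cons, List.sum_cons, List.map_append, List.sum_append]
      have hmid :
          ((PySem.List.pyRange (-(m : Int)) ((m : Int) + 1) 1).map
              (fun q => 2 * ((m : Int) + 1) + 1 - max q 0 + min q 0)).sum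
            = ((PySem.List.pyRange (-(m : Int)) ((m : Int) + 1) 1).map
              (fun q => (2 * (m : Int) + 1 - max q 0 + min q 0) + 2)).sum := by
        refine congrArg List.sum (List.map_congr_left ?_)
        intro q _; ring
      rw [hmid, PySem.List.sum_map_add_int, PySem.List.sum_map_const_int, ih,
          PySem.List.length_pyRange_one]
      have h1 : max (-((m : Int) + 1)) 0 = 0 := by omega
      have h2 : min (-((m : Int) + 1)) 0 = -((m : Int) + 1) := by omega
      have h3 : max ((m : Int) + 1) 0 = (m : Int) + 1 := by omega
      have h4 : min ((m : Int) + 1) 0 = 0 := by omega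
      have h5 : ((((m : Int) + 1) - (-(m : Int))).toNat : Int) = 2 * (m : Int) + 1 := by omega
      simp only [List.map_cons, List.map_nil, List.sum_cons, List.sum_nil, h1, h2, h3, h4, h5]
      ring

theorem lenB (R : Int) (h : 0 ≤ R) : ((hexBuildB R).length : Int) = 3 * R * (R + 1) + 1 := by
  lift R to ℕ using h
  rw [lenB_sum, hexSum_formula]

theorem lenA (R : Int) (h : 0 ≤ R) : ((hexBuildA R).length : Int) = 3 * R * (R + 1) + 1 := by
  rw [hexBuildA_eq]; exact lenB R h

theorem hexCount_ge (R : Int) (h : 0 ≤ R) : R + 1 ≤ 3 * R * (R + 1) + 1 := by nlinarith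

-- lockstep: A's while loop exits with the hexagon of exactly the radius B computes
theorem lockstep (n : Int) (f : Nat) :
    ∀ (R : Int) (pts : List (Int × Int)), 0 ≤ R → (pts.length : Int) < n →
      n ≤ R + (f : Int) + 1 →
      hexLoopA n pts R (f + 1) = hexBuildA (hexRadiusB n R (f + 1)) := by
  induction f with
  | zero =>
      intro R pts hR hlt hle
      have hc : ¬ (3 * R * (R + 1) + 1 < n) := by
        have := hexCount_ge R hR; omega
      simp only [hexLoopA, hexRadiusB, PySem.List.len_eq, hlt, if_pos, if_neg hc]
  | succ f ih =>
      intro R pts hR hlt hle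
      have hlen : ((hexBuildA R).length : Int) = 3 * R * (R + 1) + 1 := lenA R hR
      by_cases hc : 3 * R * (R + 1) + 1 < n
      · have step : hexLoopA n pts R (f + 1 + 1) = hexLoopA n (hexBuildA R) (R + 1) (f + 1) := by
          simp only [hexLoopA, PySem.List.len_eq, hlt, if_pos]
        have stepB : hexRadiusB n R (f + 1 + 1) = hexRadiusB n (R + 1) (f + 1) := by
          simp only [hexRadiusB, hc, if_pos]
        rw [step, stepB]
        exact ih (R + 1) (hexBuildA R) (by omega) (by omega) (by push_cast at hle ⊢; omega)
      · have step : hexLoopA n pts R (f + 1 + 1) = hexBuildA R := by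
          simp only [hexLoopA, PySem.List.len_eq, hlt, if_pos]
          simp only [hlen, if_neg (by omega : ¬ (3 * R * (R + 1) + 1 < n))]
        have stepB : hexRadiusB n R (f + 1 + 1) = R := by
          simp only [hexRadiusB, if_neg hc]
        rw [step, stepB]

-- ===== VERDICT (by name: the statement is the Claim_ definition above) =====
theorem generate_hex_points_spec : Claim_equal_generate_hex_points := by
  intro n _
  show generate_hex_points n = generate_hex_points_alt n
  unfold generate_hex_points generate_hex_points_alt
  by_cases hn : n ≤ 0
  · have h0 : n.toNat = 0 := Int.toNat_of_nonpos hn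
    have : hexLoopA n [] 0 (n.toNat + 1) = [] := by
      simp only [h0, hexLoopA, PySem.List.len_eq, List.length_nil]
      rw [if_neg (by omega)]
    rw [this, if_pos hn]
    simp [PySem.List.slice, PySem.List.clampIdx]
  · rw [not_le] at hn
    rw [if_neg (by omega)]
    have hfuel : n ≤ 0 + ((n.toNat : Int)) + 1 := by omega
    rw [lockstep n n.toNat 0 [] le_rfl (by simp; omega) hfuel, hexBuildA_eq]
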